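-- pv_equiv track=rewrite | github.com/nilsnavi/fit_trackerpro | backend/tools/check_coverage_thresholds.py | _find_best_threshold_for_package
-- ===== SOURCE A (Python) =====
-- CRITICAL_PACKAGE_THRESHOLDS = {
--     # Security/auth is user-facing critical surface.
--     "app.core.security": {"lines": 30, "branches": 20},
--     "app.middleware.auth": {"lines": 30, "branches": 20},
--     "app.api.deps.auth": {"lines": 30, "branches": 20},
--     "app.application.auth_service": {"lines": 30, "branches": 20},
--     # Rate limiting / idempotency protects stability and abuse scenarios.
--     "app.middleware.rate_limit": {"lines": 25, "branches": 15},
--     "app.infrastructure.idempotency": {"lines": 25, "branches": 15},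
--     # Telegram boundary: signature validation / identity extraction.
--     "app.infrastructure.telegram_auth": {"lines": 30, "branches": 20},
--     "app.core.request_identity": {"lines": 25, "branches": 15},
--     # Request integrity and safe defaults.
--     "app.middleware.security_headers": {"lines": 25, "branches": 15},
--     "app.middleware.request_correlation": {"lines": 25, "branches": 15},
--     "app.middleware.request_logging": {"lines": 25, "branches": 15},
--     "app.api.exception_handlers": {"lines": 25, "branches": 15},
--     # Core user flows / domain actions.
--     "app.application.users_service": {"lines": 25, "branches": 15},
--     "app.application.workouts_service": {"lines": 25, "branches": 15},
--     # Data access layer.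
--     "app.infrastructure.repositories": {"lines": 20, "branches": 10},
-- }
--
-- def _find_best_threshold_for_package(package_name: str) -> tuple[str, dict] | None:
--     # Match by most specific prefix (e.g. app.core.security.tokens should match app.core.security)
--     best_key = None
--     for key in CRITICAL_PACKAGE_THRESHOLDS.keys():
--         if package_name == key or package_name.startswith(f"{key}."):
--             if best_key is None or len(key) > len(best_key):
--                 best_key = key
--     if best_key is None:
--         return None
--     return best_key, CRITICAL_PACKAGE_THRESHOLDS[best_key]
-- ===== SOURCE B (Python) =====
-- # B: same thresholds, grouped by tier; walks the package name's own dotted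
-- # prefixes longest-to-shortest, checking each against the tier key groups.
-- _THRESHOLD_TIERS = [
--     ({"lines": 30, "branches": 20},
--      ("app.core.security", "app.middleware.auth", "app.api.deps.auth",
--       "app.application.auth_service", "app.infrastructure.telegram_auth")),
--     ({"lines": 25, "branches": 15},
--      ("app.middleware.rate_limit", "app.infrastructure.idempotency",
--       "app.core.request_identity", "app.middleware.security_headers",
--       "app.middleware.request_correlation", "app.middleware.request_logging",
--       "app.api.exception_handlers", "app.application.users_service",
--       "app.application.workouts_service")),
--     ({"lines": 20, "branches": 10},
--      ("app.infrastructure.repositories",)),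
-- ]
--
--
-- def _find_best_threshold_for_package(package_name: str) -> tuple[str, dict] | None:
--     # The most specific matching key is the longest dotted prefix of
--     # package_name that is a known key, so try the prefixes longest first.
--     candidate = package_name
--     while True:
--         for thresholds, keys in _THRESHOLD_TIERS:
--             if candidate in keys:
--                 return candidate, dict(thresholds)
--         dot = candidate.rfind(".")
--         if dot < 0:
--             return None
--         candidate = candidate[:dot]
-- ===== Notes on version B (the rewrite author's own statement) =====
-- stated objective: alternative
-- what changed: Instead of scanning every dict key and tracking the longest matching prefix, B groups the thresholds into three tiers and walks the package name's own dotted prefixes longest-to-shortest (cutting at the last dot each round), returning on the first prefix found in a tier's key group.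
import Mathlib
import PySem

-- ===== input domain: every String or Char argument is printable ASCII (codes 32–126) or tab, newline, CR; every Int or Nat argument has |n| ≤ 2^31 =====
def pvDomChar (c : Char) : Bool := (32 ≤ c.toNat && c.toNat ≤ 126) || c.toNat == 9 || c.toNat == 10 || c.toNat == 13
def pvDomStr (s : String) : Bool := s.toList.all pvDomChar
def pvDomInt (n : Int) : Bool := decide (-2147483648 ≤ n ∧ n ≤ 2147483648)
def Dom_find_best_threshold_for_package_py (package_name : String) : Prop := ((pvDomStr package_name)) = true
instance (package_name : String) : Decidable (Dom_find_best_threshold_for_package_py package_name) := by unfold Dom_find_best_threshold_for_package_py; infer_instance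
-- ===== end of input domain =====

-- B groups the thresholds into three tiers and walks the package name's own dotted prefixes
-- longest-to-shortest (cutting at the last dot), instead of A's scan over all dict keys
-- tracking the longest match.

-- ===== PORT A =====
-- A's module-level dict CRITICAL_PACKAGE_THRESHOLDS, in insertion order
def pvTable : List (String × List (String × Int)) :=
  [ ("app.core.security", [("lines", 30), ("branches", 20)])
  , ("app.middleware.auth", [("lines", 30), ("branches", 20)])
  , ("app.api.deps.auth", [("lines", 30), ("branches", 20)])
  , ("app.application.auth_service", [("lines", 30), ("branches", 20)])
  , ("app.middleware.rate_limit", [("lines", 25), ("branches", 15)])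
  , ("app.infrastructure.idempotency", [("lines", 25), ("branches", 15)])
  , ("app.infrastructure.telegram_auth", [("lines", 30), ("branches", 20)])
  , ("app.core.request_identity", [("lines", 25), ("branches", 15)])
  , ("app.middleware.security_headers", [("lines", 25), ("branches", 15)])
  , ("app.middleware.request_correlation", [("lines", 25), ("branches", 15)])
  , ("app.middleware.request_logging", [("lines", 25), ("branches", 15)])
  , ("app.api.exception_handlers", [("lines", 25), ("branches", 15)])
  , ("app.application.users_service", [("lines", 25), ("branches", 15)])
  , ("app.application.workouts_service", [("lines", 25), ("branches", 15)])
  , ("app.infrastructure.repositories", [("lines", 20), ("branches", 10)])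
  ]

-- A: scan all keys, keep the longest matching one, then index the dict with it.
-- Strings are handled as their character lists; `package_name == key or package_name.startswith(key + ".")`
-- is the `p == k || startswith p (k ++ ['.'])` test below.  `CRITICAL_PACKAGE_THRESHOLDS[best_key]`
-- is the first-match dict lookup `find?` (best_key is always present, so the none branch is unreachable).
def find_best_threshold_for_package_py (package_name : String) : Option (String × (List (String × Int))) :=
  let p := package_name.toList
  let best_key := pvTable.foldl
    (fun best_key e =>
      if p == e.1.toList || PySem.Chars.startswith p (e.1.toList ++ ['.']) then
        match best_key with
        | none => some e.1
        | some bk => if e.1.toList.length > bk.toList.length then some e.1 else some bk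
      else best_key)
    (none : Option String)
  match best_key with
  | none => none
  | some bk => (pvTable.find? (fun e => e.1 == bk)).map (fun e => (bk, e.2))

-- ===== PORT B =====
-- B's module-level constant _THRESHOLD_TIERS: the thresholds grouped by tier
def pvTiers : List ((List (String × Int)) × List String) :=
  [ ⟨[⟨"lines", 30⟩, ⟨"branches", 20⟩]
    , [ "app.core.security", "app.middleware.auth", "app.api.deps.auth"
      , "app.application.auth_service", "app.infrastructure.telegram_auth" ]⟩
  , ⟨[⟨"lines", 25⟩, ⟨"branches", 15⟩]
    , [ "app.middleware.rate_limit", "app.infrastructure.idempotency"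
      , "app.core.request_identity", "app.middleware.security_headers"
      , "app.middleware.request_correlation", "app.middleware.request_logging"
      , "app.api.exception_handlers", "app.application.users_service"
      , "app.application.workouts_service" ]⟩
  , ⟨[⟨"lines", 20⟩, ⟨"branches", 10⟩]
    , [ "app.infrastructure.repositories" ]⟩
  ]

-- cases of PySem.Chars.rfind.go, needed to justify termination of B's loop
theorem pvRfindGoCases (s sub : List Char) :
    ∀ n : Nat, (PySem.Chars.rfind.go s sub n = -1 ∧ ∀ j ≤ n, ¬ sub.isPrefixOf (s.drop j))
      ∨ (∃ j ≤ n, PySem.Chars.rfind.go s sub n = (j : Int) ∧ sub.isPrefixOf (s.drop j)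
           ∧ ∀ m, j < m → m ≤ n → ¬ sub.isPrefixOf (s.drop m)) := by
  intro n
  induction n with
  | zero =>
    by_cases h : sub.isPrefixOf s
    · right
      refine ⟨0, le_refl _, ?_, by simpa using h, by omega⟩
      simp [PySem.Chars.rfind.go, h]
    · left
      constructor
      · simp [PySem.Chars.rfind.go, h]
      · intro j hj
        interval_cases j
        simpa using h
  | succ n ih =>
    by_cases h : sub.isPrefixOf (s.drop (n + 1))
    · right
      refine ⟨n + 1, le_refl _, ?_, h, by omega⟩
      simp [PySem.Chars.rfind.go, h]
    · have hgo : PySem.Chars.rfind.go s sub (n + 1) = PySem.Chars.rfind.go s sub n := by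
        simp [PySem.Chars.rfind.go, h]
      rcases ih with ⟨h1, h2⟩ | ⟨j, hj, h1, h2, h3⟩
      · left
        refine ⟨hgo ▸ h1, ?_⟩
        intro j hj
        rcases Nat.lt_or_ge j (n + 1) with hlt | hge
        · exact h2 j (by omega)
        · have hje : j = n + 1 := by omega
          subst hje; exact h
      · right
        refine ⟨j, by omega, hgo ▸ h1, h2, ?_⟩
        intro m hm hm'
        rcases Nat.lt_or_ge m (n + 1) with hlt | hge
        · exact h3 m hm (by omega)
        · have hme : m = n + 1 := by omega
          subst hme; exact h

-- if rfind is non-negative it is a valid index, so cutting there shrinks the string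
theorem pvRfind_lt (s : List Char) (h : ¬ PySem.Chars.rfind s ['.'] < 0) :
    (PySem.Chars.rfind s ['.']).toNat < s.length := by
  rcases pvRfindGoCases s ['.'] s.length with ⟨h1, _⟩ | ⟨j, hj, h1, h2, _⟩
  · exact absurd (by rw [PySem.Chars.rfind, h1]; norm_num) h
  · rw [PySem.Chars.rfind, h1]
    simp only [Int.toNat_natCast]
    have hne : s.drop j ≠ [] := by
      intro he; rw [he] at h2; simp at h2
    by_contra hc
    exact hne (List.drop_eq_nil_of_le (by omega))

-- B: walk the candidate's dotted prefixes, longest first; for each candidate scan the three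
-- tiers for a key group containing it (the inner `for … if candidate in keys: return` is the
-- first-match `find?` over pvTiers).  The loop state `candidate` is kept as a character list;
-- `candidate[:dot]` is `take dot.toNat`, exact here because dot ≥ 0 on that branch;
-- `dict(thresholds)` builds a fresh dict from the tier's pairs: `(PySem.Dict.ofList t.1).items`.
def pvBLoop (cand : List Char) : Option (String × (List (String × Int))) :=
  match pvTiers.find? (fun t => t.2.contains (String.ofList cand)) with
  | some t => some ⟨String.ofList cand, (PySem.Dict.ofList t.1).items⟩
  | none =>
    let dot := PySem.Chars.rfind cand ['.']
    if h : dot < 0 then none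
    else pvBLoop (cand.take dot.toNat)
termination_by cand.length
decreasing_by
  have := pvRfind_lt cand h
  have ht : (cand.take (PySem.Chars.rfind cand ['.']).toNat).length ≤ (PySem.Chars.rfind cand ['.']).toNat := by
    simpa using List.length_take_le _ _
  omega

def find_best_threshold_for_package_py_alt (package_name : String) : Option (String × (List (String × Int))) :=
  pvBLoop package_name.toList

-- ===== PRECONDITION & SPEC =====
def Spec_find_best_threshold_for_package_py (package_name : String) (out : Option (String × (List (String × Int)))) : Prop := out = find_best_threshold_for_package_py_alt package_name
instance (package_name : String) (out : Option (String × (List (String × Int)))) : Decidable (Spec_find_best_threshold_for_package_py package_name out) := by unfold Spec_find_best_threshold_for_package_py; infer_instance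

-- ===== CLAIM (what is proved, stated in full; the proofs are below) =====
def Claim_equal_find_best_threshold_for_package_py : Prop := ∀ (package_name : String), Dom_find_best_threshold_for_package_py package_name → Spec_find_best_threshold_for_package_py package_name (find_best_threshold_for_package_py package_name)

-- ===== LEMMAS AND PROOFS =====

-- k "dot-matches" c: k ++ "." is a prefix of c ++ "."  (⟺ c == k or c starts with k ++ ".")
def pvDmatch (k c : List Char) : Bool := (k ++ ['.']).isPrefixOf (c ++ ['.'])

-- the table entries sorted by key length, longest first
def pvSorted : List (String × List (String × Int)) :=
  [ ("app.middleware.request_correlation", [("lines", 25), ("branches", 15)])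
  , ("app.infrastructure.telegram_auth", [("lines", 30), ("branches", 20)])
  , ("app.application.workouts_service", [("lines", 25), ("branches", 15)])
  , ("app.middleware.security_headers", [("lines", 25), ("branches", 15)])
  , ("app.infrastructure.repositories", [("lines", 20), ("branches", 10)])
  , ("app.infrastructure.idempotency", [("lines", 25), ("branches", 15)])
  , ("app.middleware.request_logging", [("lines", 25), ("branches", 15)])
  , ("app.application.users_service", [("lines", 25), ("branches", 15)])
  , ("app.application.auth_service", [("lines", 30), ("branches", 20)])
  , ("app.api.exception_handlers", [("lines", 25), ("branches", 15)])
  , ("app.middleware.rate_limit", [("lines", 25), ("branches", 15)])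
  , ("app.core.request_identity", [("lines", 25), ("branches", 15)])
  , ("app.middleware.auth", [("lines", 30), ("branches", 20)])
  , ("app.core.security", [("lines", 30), ("branches", 20)])
  , ("app.api.deps.auth", [("lines", 30), ("branches", 20)])
  ]

-- the common reference value: the longest-key entry whose key dot-matches cand
def pvRef (cand : List Char) : Option (String × (List (String × Int))) :=
  (pvSorted.find? (fun e => pvDmatch e.1.toList cand)).map (fun e => (e.1, e.2))

-- A's per-key test is exactly pvDmatch
theorem pvCond_eq (p : List Char) (k : String) :
    (p == k.toList || PySem.Chars.startswith p (k.toList ++ ['.'])) = pvDmatch k.toList p := by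
  rw [Bool.eq_iff_iff]
  simp only [pvDmatch, PySem.Chars.startswith, Bool.or_eq_true, beq_iff_eq,
    List.isPrefixOf_iff_prefix]
  rw [List.prefix_concat_iff]
  constructor
  · rintro (h | h)
    · left; rw [h]
    · right; exact h
  · rintro (h | h)
    · left; exact ((List.append_left_inj _).mp h).symm
    · right; exact h

-- A's fold step, named
def pvStep (c : String → Bool) (best : Option String) (e : String × List (String × Int)) : Option String :=
  if c e.1 then
    match best with
    | none => some e.1
    | some bk => if e.1.toList.length > bk.toList.length then some e.1 else some bk
  else best

theorem pvStep_comm (c : String → Bool) (x y : String × List (String × Int))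
    (hxy : c x.1 = true → c y.1 = true → x.1.toList.length = y.1.toList.length → x.1 = y.1)
    (z : Option String) : pvStep c (pvStep c z x) y = pvStep c (pvStep c z y) x := by
  by_cases hx : c x.1 <;> by_cases hy : c y.1
  · have hne := hxy hx hy
    simp only [pvStep, hx, hy, if_true]
    cases z with
    | none =>
      simp only []
      split_ifs <;>
        first | rfl | omega | (exact congrArg some (hne (by omega)))
    | some bk =>
      simp only []
      split_ifs <;> simp only [] <;> split_ifs <;>
        first | rfl | omega | (exact congrArg some (hne (by omega)))
  · simp [pvStep, hx, hy]
  · simp [pvStep, hx, hy]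
  · simp [pvStep, hx, hy]

theorem pvFoldl_keep (c : String → Bool) (bk : String) :
    ∀ (l : List (String × List (String × Int))),
      (∀ e ∈ l, c e.1 = true → ¬ bk.toList.length < e.1.toList.length) →
      l.foldl (pvStep c) (some bk) = some bk := by
  intro l
  induction l with
  | nil => intro _; rfl
  | cons e l ih =>
    intro h
    have hstep : pvStep c (some bk) e = some bk := by
      unfold pvStep
      by_cases hc : c e.1
      · simp only [hc, if_true]
        have := h e (by simp) hc
        exact if_neg (by omega)
      · simp [hc]
    simp only [List.foldl_cons, hstep]
    exact ih (fun x hx => h x (by simp [hx]))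

theorem pvFoldl_sorted (c : String → Bool) :
    ∀ (l : List (String × List (String × Int))),
      l.Pairwise (fun a b => b.1.toList.length ≤ a.1.toList.length) →
      l.foldl (pvStep c) none = (l.find? (fun e => c e.1)).map (fun e => e.1) := by
  intro l
  induction l with
  | nil => intro _; rfl
  | cons e l ih =>
    intro hp
    rw [List.pairwise_cons] at hp
    by_cases hc : c e.1
    · have hstep : pvStep c none e = some e.1 := by simp [pvStep, hc]
      simp only [List.foldl_cons, hstep, List.find?_cons, hc]
      rw [pvFoldl_keep c e.1 l (fun x hx _ => by have := hp.1 x hx; omega)]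
      rfl
    · have hstep : pvStep c none e = none := by simp [pvStep, hc]
      simp only [List.foldl_cons, hstep, List.find?_cons, hc]
      exact ih hp.2

theorem pvPerm : pvTable.Perm pvSorted := by decide

theorem pvPairwise : pvSorted.Pairwise (fun a b => b.1.toList.length ≤ a.1.toList.length) := by decide

-- every table key lives in some tier's key group
theorem pvKeysCover : ∀ x ∈ pvTable, ∃ t ∈ pvTiers, x.1 ∈ t.2 := by decide

-- two dot-matching keys of equal length are equal
theorem pvDmatch_uniq {a b c : List Char} (ha : pvDmatch a c = true) (hb : pvDmatch b c = true)
    (hl : a.length = b.length) : a = b := by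
  simp only [pvDmatch, List.isPrefixOf_iff_prefix] at ha hb
  have h1 := List.prefix_of_prefix_length_le ha hb (by simp [hl])
  have h2 := h1.eq_of_length (by simp [hl])
  simpa using h2

-- A's scan equals the first match over the length-sorted table
theorem pvA_eq_ref (package_name : String) :
    find_best_threshold_for_package_py package_name = pvRef package_name.toList := by
  have hfun : (fun (best_key : Option String) (e : String × List (String × Int)) =>
      if package_name.toList == e.1.toList ||
          PySem.Chars.startswith package_name.toList (e.1.toList ++ ['.']) then
        match best_key with
        | none => some e.1
        | some bk => if e.1.toList.length > bk.toList.length then some e.1 else some bk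
      else best_key) = pvStep (fun k => pvDmatch k.toList package_name.toList) := by
    funext best e
    rw [pvCond_eq package_name.toList e.1]
    rfl
  have hcomm : ∀ x ∈ pvTable, ∀ y ∈ pvTable, ∀ (z : Option String),
      pvStep (fun k => pvDmatch k.toList package_name.toList)
        (pvStep (fun k => pvDmatch k.toList package_name.toList) z x) y
      = pvStep (fun k => pvDmatch k.toList package_name.toList)
        (pvStep (fun k => pvDmatch k.toList package_name.toList) z y) x := by
    intro x _ y _ z
    apply pvStep_comm
    intro hcx hcy hlen
    exact String.toList_inj.mp (pvDmatch_uniq hcx hcy hlen)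
  unfold find_best_threshold_for_package_py
  simp only [hfun, pvPerm.foldl_eq' hcomm,
    pvFoldl_sorted (fun k => pvDmatch k.toList package_name.toList) pvSorted pvPairwise]
  cases hfind : pvSorted.find? (fun e => pvDmatch e.1.toList package_name.toList) with
  | none => simp [pvRef, hfind]
  | some e =>
    have he := List.mem_of_find?_eq_some hfind
    simp only [pvRef, hfind, Option.map_some]
    fin_cases he <;> decide

-- find? only depends on the predicate's values on the list
theorem pvFind?_congr {α : Type} (p q : α → Bool) :
    ∀ (l : List α), (∀ a ∈ l, p a = q a) → l.find? p = l.find? q := by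
  intro l h
  induction l with
  | nil => rfl
  | cons a l ih =>
    have ha := h a (by simp)
    simp only [List.find?_cons, ha]
    cases q a
    · exact ih (fun x hx => h x (by simp [hx]))
    · rfl

-- cutting at the last dot preserves the set of dot-matching keys other than cand itself
theorem pvDmatch_cut {k cand : List Char} {j : Nat}
    (hj : cand[j]? = some '.') (hmax : ∀ m, j < m → cand[m]? ≠ some '.')
    (hne : k ≠ cand) : pvDmatch k cand = pvDmatch k (cand.take j) := by
  rw [Bool.eq_iff_iff]
  simp only [pvDmatch, List.isPrefixOf_iff_prefix]
  constructor
  · intro h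
    rcases List.prefix_concat_iff.mp h with heq | hp
    · exact absurd ((List.append_left_inj _).mp heq) hne
    · have hdot : cand[k.length]? = some '.' := by
        have hkeq := List.prefix_iff_eq_take.mp hp
        have hlen : (k ++ ['.']).length = k.length + 1 := by simp
        calc cand[k.length]? = (cand.take (k.length + 1))[k.length]? := by
              rw [List.getElem?_take_of_lt (by omega)]
          _ = (k ++ ['.'])[k.length]? := by rw [hlen] at hkeq; rw [← hkeq]
          _ = some '.' := by simp
      have hkle : k.length ≤ j := by
        by_contra hc
        exact hmax k.length (by omega) hdot
      rcases Nat.lt_or_ge k.length j with hlt | hge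
      · have hpt : k ++ ['.'] <+: cand.take j :=
          List.prefix_take_iff.mpr ⟨hp, by simp; omega⟩
        exact hpt.trans (List.prefix_append _ _)
      · have hkj : k.length = j := by omega
        have hk : k = cand.take j := by
          have hkpre : k <+: cand := (List.prefix_append k ['.']).trans hp
          rw [List.prefix_iff_eq_take.mp hkpre, hkj]
        rw [hk]
  · intro h
    rcases List.prefix_concat_iff.mp h with heq | hp
    · have hk : k = cand.take j := (List.append_left_inj _).mp heq
      have hsucc : cand.take (j + 1) = cand.take j ++ ['.'] := by
        rw [List.take_add_one, hj]; rfl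
      rw [hk, ← hsucc]
      exact (List.take_prefix _ _).trans (List.prefix_append _ _)
    · exact (hp.trans (List.take_prefix _ _)).trans (List.prefix_append _ _)

-- a one-character pattern is a prefix exactly when it is the head
theorem pvDotPrefix (l : List Char) : ['.'] <+: l ↔ l.head? = some '.' := by
  cases l with
  | nil => simp
  | cons a t =>
    constructor
    · rintro ⟨r, hr⟩
      simp at hr
      simp [hr.1.symm]
    · intro h
      simp at h
      exact ⟨t, by simp [h]⟩

-- B's loop computes the reference value
theorem pvB_eq_ref : ∀ (cand : List Char), pvBLoop cand = pvRef cand := by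
  intro cand
  generalize hn : cand.length = n
  induction n using Nat.strong_induction_on generalizing cand with
  | _ n ih =>
  rw [pvBLoop]
  cases hfind : pvTiers.find? (fun t => t.2.contains (String.ofList cand)) with
  | some t =>
    have ht := List.mem_of_find?_eq_some hfind
    have hc : t.2.contains (String.ofList cand) = true := List.find?_some (p := fun (t : (List (String × Int)) × List String) => t.2.contains (String.ofList cand)) hfind
    rw [List.contains_iff_mem] at hc
    simp only []
    fin_cases ht
    · simp only [List.mem_cons, List.not_mem_nil, or_false] at hc
      rcases hc with h | h | h | h | h <;>
        (rw [show cand = (String.ofList cand).toList from by simp, h]; decide)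
    · simp only [List.mem_cons, List.not_mem_nil, or_false] at hc
      rcases hc with h | h | h | h | h | h | h | h | h <;>
        (rw [show cand = (String.ofList cand).toList from by simp, h]; decide)
    · simp only [List.mem_cons, List.not_mem_nil, or_false] at hc
      rw [show cand = (String.ofList cand).toList from by simp, hc]; decide
  | none =>
    have hnone := List.find?_eq_none.mp hfind
    have hmiss : ∀ x ∈ pvTable, ¬ (x.1.toList == cand) = true := by
      intro x hx hx'
      rcases pvKeysCover x hx with ⟨t, ht, hkt⟩
      have hx1 : x.1 = String.ofList cand := by
        have := beq_iff_eq.mp hx'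
        rw [← this]
        simp
      exact hnone t ht (by rw [List.contains_iff_mem]; exact hx1 ▸ hkt)
    simp only []
    rcases pvRfindGoCases cand ['.'] cand.length with ⟨h1, h2⟩ | ⟨j, hj, h1, h2, h3⟩
    · rw [PySem.Chars.rfind] at *
      rw [dif_pos (by rw [h1]; norm_num)]
      symm
      unfold pvRef
      rw [List.find?_eq_none.mpr, Option.map_none]
      intro x hx
      intro hdm
      rcases List.prefix_concat_iff.mp (List.isPrefixOf_iff_prefix.mp hdm) with heq | hp
      · exact hmiss x (pvPerm.mem_iff.mpr hx) (by simp [(List.append_left_inj _).mp heq])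
      · have hmem : '.' ∈ cand := hp.subset (by simp)
        rcases List.mem_iff_getElem?.mp hmem with ⟨i, hi⟩
        have hilt : i < cand.length := by
          by_contra hc
          rw [List.getElem?_eq_none (by omega)] at hi
          exact absurd hi (by simp)
        exact h2 i (by omega) (by
          rw [List.isPrefixOf_iff_prefix, pvDotPrefix, List.head?_drop]
          exact hi)
    · rw [PySem.Chars.rfind] at *
      have hjlt : j < cand.length := by
        have hne : cand.drop j ≠ [] := by
          intro he; rw [he] at h2; simp at h2
        by_contra hc
        exact hne (List.drop_eq_nil_of_le (by omega))
      rw [dif_neg (by rw [h1]; omega)]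
      have hjd : cand[j]? = some '.' := by
        rw [← List.head?_drop, ← pvDotPrefix, ← List.isPrefixOf_iff_prefix]
        exact h2
      have hmax : ∀ m, j < m → cand[m]? ≠ some '.' := by
        intro m hm hme
        have hmlt : m < cand.length := by
          by_contra hc
          rw [List.getElem?_eq_none (by omega)] at hme
          exact absurd hme (by simp)
        exact h3 m hm (by omega) (by
          rw [List.isPrefixOf_iff_prefix, pvDotPrefix, List.head?_drop]
          exact hme)
      have hrefeq : pvRef cand = pvRef (cand.take j) := by
        unfold pvRef
        rw [pvFind?_congr _ _ pvSorted]
        intro e hx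
        exact pvDmatch_cut hjd hmax
          (fun hc => hmiss e (pvPerm.mem_iff.mpr hx) (by simp [hc]))
      rw [h1]
      simp only [Int.toNat_natCast]
      rw [hrefeq]
      exact ih (cand.take j).length (by simp; omega) (cand.take j) rfl

-- ===== VERDICT (by name: the statement is the Claim_ definition above) =====
theorem find_best_threshold_for_package_py_spec : Claim_equal_find_best_threshold_for_package_py := by
  intro package_name _
  unfold Spec_find_best_threshold_for_package_py find_best_threshold_for_package_py_alt
  rw [pvA_eq_ref, pvB_eq_ref]
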